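-- pv_equiv track=rewrite | github.com/anshsgit/sql-syntax-checker | select/helper/orderByHelpers.py | splitOrderByItems
-- ===== SOURCE A (Python) =====
-- def splitOrderByItems(tokens):
--     """
--     Splits ORDER BY clause into individual items.
--     Commas inside parentheses are ignored.
--     """
--     items = []
--     depth = 0
--     start = 0
--
--     for i, tok in enumerate(tokens):
--         if tok == "(":
--             depth += 1
--         elif tok == ")":
--             depth -= 1
--         elif depth == 0 and tok == ",":
--             items.append(tokens[start:i])
--             start = i + 1
--
--     items.append(tokens[start:])
--     return items
-- ===== SOURCE B (Python) =====
-- def splitOrderByItems(tokens):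
--     """
--     Reverse scan: a comma is a top-level separator iff the parenthesis
--     balance of the suffix strictly after it equals the total balance of the
--     whole list (i.e. the prefix balance before it is 0).  Items are built
--     back-to-front and reversed at the end.
--     """
--     total = tokens.count("(") - tokens.count(")")
--     items = []
--     current = []
--     rd = 0  # (#')' - #'(') among the tokens already scanned (the suffix)
--     for tok in reversed(tokens):
--         if tok == ")":
--             rd += 1
--         elif tok == "(":
--             rd -= 1
--         if tok == "," and rd == -total:
--             items.append(current[::-1])
--             current = []
--         else:
--             current.append(tok)
--     items.append(current[::-1])
--     return items[::-1]
-- ===== Notes on version B (the rewrite author's own statement) =====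
-- stated objective: alternative
-- what changed: B scans the tokens in REVERSE, tracking the suffix parenthesis balance and precomputing the total balance via two count() calls: a comma is a top-level separator iff the suffix balance equals the total balance (equivalent to prefix depth 0); items are accumulated back-to-front and reversed at the end, instead of A's forward scan with a moving start pointer and slicing.
import Mathlib
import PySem

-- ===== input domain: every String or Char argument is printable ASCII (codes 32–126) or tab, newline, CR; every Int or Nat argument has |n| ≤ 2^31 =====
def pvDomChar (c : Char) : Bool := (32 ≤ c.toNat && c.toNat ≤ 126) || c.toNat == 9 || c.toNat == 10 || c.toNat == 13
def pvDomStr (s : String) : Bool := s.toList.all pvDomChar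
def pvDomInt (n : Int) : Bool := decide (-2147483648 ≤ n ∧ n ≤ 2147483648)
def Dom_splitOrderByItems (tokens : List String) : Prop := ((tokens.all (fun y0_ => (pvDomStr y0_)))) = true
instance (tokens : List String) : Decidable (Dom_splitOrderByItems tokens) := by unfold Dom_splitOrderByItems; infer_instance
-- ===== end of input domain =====

-- B replaces A's forward scan (depth counter + moving start pointer + slicing) by a
-- REVERSE scan: with the total parenthesis balance precomputed, a comma is top-level
-- iff the suffix balance equals the total; items are built back-to-front.
-- Alternative decomposition, same cost.

-- ===== PORT A =====
-- loop body of A: state = (items, depth, start), one enumerated token at a time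
def pvStepA (tokens : List String) (st : List (List String) × Int × Int) (p : Int × String) :
    List (List String) × Int × Int :=
  if p.2 = "(" then (st.1, st.2.1 + 1, st.2.2)
  else if p.2 = ")" then (st.1, st.2.1 - 1, st.2.2)
  else if st.2.1 = 0 ∧ p.2 = "," then
    (st.1 ++ [PySem.List.slice tokens (some st.2.2) (some p.1)], st.2.1, p.1 + 1)
  else st

def splitOrderByItems (tokens : List String) : List (List String) :=
  let fin := (PySem.List.enumerate tokens).foldl (pvStepA tokens) ([], 0, 0)
  fin.1 ++ [PySem.List.slice tokens (some fin.2.2) none]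

-- ===== PORT B =====
-- loop body of B: state = (items, current, rd); rd = (#')' − #'(') among the scanned suffix
def pvStepRev (total : Int) (st : List (List String) × List String × Int) (tok : String) :
    List (List String) × List String × Int :=
  let rd := if tok = ")" then st.2.2 + 1 else if tok = "(" then st.2.2 - 1 else st.2.2
  if tok = "," ∧ rd = -total then (st.1 ++ [st.2.1.reverse], [], rd)
  else (st.1, st.2.1 ++ [tok], rd)

def splitOrderByItems_alt (tokens : List String) : List (List String) :=
  let total : Int := (PySem.List.count tokens "(" : Int) - (PySem.List.count tokens ")" : Int)
  let fin := tokens.reverse.foldl (pvStepRev total) ([], [], 0)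
  (fin.1 ++ [fin.2.1.reverse]).reverse

-- ===== PRECONDITION & SPEC =====
def Spec_splitOrderByItems (tokens : List String) (out : List (List String)) : Prop := out = splitOrderByItems_alt tokens
instance (tokens : List String) (out : List (List String)) : Decidable (Spec_splitOrderByItems tokens out) := by unfold Spec_splitOrderByItems; infer_instance

-- ===== CLAIM (what is proved, stated in full; the proofs are below) =====
def Claim_equal_splitOrderByItems : Prop := ∀ (tokens : List String), Dom_splitOrderByItems tokens → Spec_splitOrderByItems tokens (splitOrderByItems tokens)

-- ===== LEMMAS AND PROOFS =====

-- common functional specification: split at depth-0 commas, prefix depth d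
def pvConsHead (t : String) : List (List String) → List (List String)
  | [] => [[t]]
  | x :: xs => (t :: x) :: xs

def pvSplit : List String → Int → List (List String)
  | [], _ => [[]]
  | t :: r, d =>
    if t = "(" then pvConsHead t (pvSplit r (d + 1))
    else if t = ")" then pvConsHead t (pvSplit r (d - 1))
    else if d = 0 ∧ t = "," then [] :: pvSplit r d
    else pvConsHead t (pvSplit r d)

-- prepend a finished prefix onto the first item
def pvPrep (pre : List String) : List (List String) → List (List String)
  | [] => [pre]
  | x :: xs => (pre ++ x) :: xs

-- net parenthesis balance
def pvBal : List String → Int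
  | [] => 0
  | t :: r => (if t = "(" then 1 else if t = ")" then -1 else 0) + pvBal r

lemma pvConsHead_ne_nil (t : String) (L : List (List String)) : pvConsHead t L ≠ [] := by
  cases L <;> simp [pvConsHead]

lemma pvConsHead_cons (t : String) (x : List String) (xs : List (List String)) :
    pvConsHead t (x :: xs) = (t :: x) :: xs := rfl

lemma pvSplit_ne_nil (r : List String) (d : Int) : pvSplit r d ≠ [] := by
  cases r with
  | nil => simp [pvSplit]
  | cons t r =>
    simp only [pvSplit]
    split_ifs <;> simp [pvConsHead_ne_nil]

lemma pvSplit_lparen (r : List String) (d : Int) :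
    pvSplit ("(" :: r) d = pvConsHead "(" (pvSplit r (d + 1)) := by simp [pvSplit]

lemma pvSplit_rparen (r : List String) (d : Int) :
    pvSplit (")" :: r) d = pvConsHead ")" (pvSplit r (d - 1)) := by simp [pvSplit]

lemma pvSplit_comma (r : List String) : pvSplit ("," :: r) 0 = [] :: pvSplit r 0 := by
  simp [pvSplit]

lemma pvSplit_other (r : List String) (d : Int) (t : String)
    (h1 : t ≠ "(") (h2 : t ≠ ")") (h3 : ¬(d = 0 ∧ t = ",")) :
    pvSplit (t :: r) d = pvConsHead t (pvSplit r d) := by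
  simp [pvSplit, h1, h2, h3]

lemma pvPrep_nil (L : List (List String)) (h : L ≠ []) : pvPrep [] L = L := by
  cases L with
  | nil => exact absurd rfl h
  | cons x xs => simp [pvPrep]

lemma pvPrep_consHead (pre : List String) (t : String) (L : List (List String)) :
    pvPrep pre (pvConsHead t L) = pvPrep (pre ++ [t]) L := by
  cases L <;> simp [pvPrep, pvConsHead]

lemma pvTake_snoc (tokens : List String) (s i : ℕ) (t : String) (r : List String)
    (hdrop : tokens.drop i = t :: r) (hsi : s ≤ i) :
    (tokens.drop s).take (i + 1 - s) = (tokens.drop s).take (i - s) ++ [t] := by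
  have hi : i < tokens.length := by
    by_contra h
    rw [List.drop_eq_nil_of_le (by omega)] at hdrop
    exact List.cons_ne_nil t r hdrop.symm
  have hget : tokens[i]? = some t := by
    have := congrArg List.head? hdrop
    rwa [List.head?_drop] at this
  have h1 : i + 1 - s = (i - s) + 1 := by omega
  rw [h1, List.take_add_one]
  have h2 : (tokens.drop s)[i - s]? = tokens[i]? := by
    rw [List.getElem?_drop]; congr 1; omega
  rw [h2, hget]
  rfl

-- A's loop, characterised against pvSplit
lemma pvFoldA (tokens : List String) (rest : List String) :
    ∀ (i s : ℕ) (d : Int) (items : List (List String)),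
    tokens.drop i = rest → s ≤ i →
    (let fin := (PySem.List.enumerate rest (i : Int)).foldl (pvStepA tokens) (items, d, (s : Int));
     fin.1 ++ [PySem.List.slice tokens (some fin.2.2) none])
    = items ++ pvPrep ((tokens.drop s).take (i - s)) (pvSplit rest d) := by
  induction rest generalizing tokens with
  | nil =>
    intro i s d items hdrop hsi
    have hlen : tokens.length ≤ i := by
      by_contra h
      have := List.drop_eq_nil_iff.mp hdrop
      omega
    simp only [PySem.List.enumerate_nil, List.foldl_nil]
    rw [PySem.List.slice_from_natCast]
    have : (tokens.drop s).take (i - s) = tokens.drop s :=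
      List.take_of_length_le (by simp; omega)
    simp [pvSplit, pvPrep, this]
  | cons t r ih =>
    intro i s d items hdrop hsi
    have hdropr : tokens.drop (i + 1) = r := by
      have h := congrArg (List.drop 1) hdrop
      rw [List.drop_drop] at h
      simpa [Nat.add_comm] using h
    simp only [PySem.List.enumerate_cons, List.foldl_cons]
    have hcast : (i : Int) + 1 = ((i + 1 : ℕ) : Int) := by push_cast; ring
    by_cases h1 : t = "("
    · rw [show pvStepA tokens (items, d, (s : Int)) ((i : Int), t)
          = (items, d + 1, (s : Int)) from by simp [pvStepA, h1]]
      rw [hcast, ih tokens (i + 1) s (d + 1) items hdropr (by omega)]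
      rw [pvTake_snoc tokens s i t r hdrop hsi, h1, pvSplit_lparen]
      rw [pvPrep_consHead]
    · by_cases h2 : t = ")"
      · rw [show pvStepA tokens (items, d, (s : Int)) ((i : Int), t)
            = (items, d - 1, (s : Int)) from by simp [pvStepA, h2]]
        rw [hcast, ih tokens (i + 1) s (d - 1) items hdropr (by omega)]
        rw [pvTake_snoc tokens s i t r hdrop hsi, h2, pvSplit_rparen]
        rw [pvPrep_consHead]
      · by_cases h3 : d = 0 ∧ t = ","
        · obtain ⟨hd0, ht⟩ := h3
          subst hd0
          rw [show pvStepA tokens (items, 0, (s : Int)) ((i : Int), t)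
              = (items ++ [PySem.List.slice tokens (some (s : Int)) (some (i : Int))], 0, (i : Int) + 1) from by
            simp [pvStepA, ht]]
          rw [hcast, ih tokens (i + 1) (i + 1) 0 _ hdropr (le_refl _)]
          rw [PySem.List.slice_natCast, Nat.sub_self, List.take_zero]
          rw [pvPrep_nil _ (pvSplit_ne_nil r 0), ht, pvSplit_comma]
          simp [pvPrep]
        · rw [show pvStepA tokens (items, d, (s : Int)) ((i : Int), t)
              = (items, d, (s : Int)) from by simp [pvStepA, h1, h2, h3]]
          rw [hcast, ih tokens (i + 1) s d items hdropr (by omega)]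
          rw [pvTake_snoc tokens s i t r hdrop hsi, pvSplit_other r d t h1 h2 h3]
          rw [pvPrep_consHead]

-- B's loop (as a foldr over the original list), characterised against pvSplit
lemma pvFoldB (total : Int) (rest : List String) :
    (rest.foldr (fun t st => pvStepRev total st t) ([], [], 0)).2.2 = -(pvBal rest)
    ∧ (rest.foldr (fun t st => pvStepRev total st t) ([], [], 0)).2.1.reverse
        :: (rest.foldr (fun t st => pvStepRev total st t) ([], [], 0)).1.reverse
      = pvSplit rest (total - pvBal rest) := by
  induction rest with
  | nil => simp [pvBal, pvSplit]
  | cons t r ih =>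
    obtain ⟨ihrd, ihsp⟩ := ih
    simp only [List.foldr_cons]
    set g := r.foldr (fun t st => pvStepRev total st t) ([], [], 0) with hg
    by_cases h1 : t = "("
    · subst h1
      rw [show pvStepRev total g "(" = (g.1, g.2.1 ++ ["("], g.2.2 - 1) from by simp [pvStepRev]]
      refine ⟨?_, ?_⟩
      · show g.2.2 - 1 = -pvBal ("(" :: r)
        rw [show pvBal ("(" :: r) = 1 + pvBal r from by simp [pvBal]]
        omega
      · show (g.2.1 ++ ["("]).reverse :: g.1.reverse = pvSplit ("(" :: r) (total - pvBal ("(" :: r))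
        rw [pvSplit_lparen,
          show total - pvBal ("(" :: r) + 1 = total - pvBal r from by simp [pvBal]; ring,
          ← ihsp, pvConsHead_cons]
        simp
    · by_cases h2 : t = ")"
      · subst h2
        rw [show pvStepRev total g ")" = (g.1, g.2.1 ++ [")"], g.2.2 + 1) from by simp [pvStepRev]]
        refine ⟨?_, ?_⟩
        · show g.2.2 + 1 = -pvBal (")" :: r)
          rw [show pvBal (")" :: r) = -1 + pvBal r from by simp [pvBal]]
          omega
        · show (g.2.1 ++ [")"]).reverse :: g.1.reverse = pvSplit (")" :: r) (total - pvBal (")" :: r))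
          rw [pvSplit_rparen,
            show total - pvBal (")" :: r) - 1 = total - pvBal r from by simp [pvBal]; ring,
            ← ihsp, pvConsHead_cons]
          simp
      · have hbal : pvBal (t :: r) = pvBal r := by simp [pvBal, h1, h2]
        by_cases h3 : t = "," ∧ g.2.2 = -total
        · obtain ⟨ht, hrd⟩ := h3
          subst ht
          have hd0 : total - pvBal r = 0 := by
            rw [ihrd] at hrd; omega
          rw [show pvStepRev total g "," = (g.1 ++ [g.2.1.reverse], [], g.2.2) from by
            simp [pvStepRev, hrd]]
          refine ⟨?_, ?_⟩
          · show g.2.2 = -pvBal ("," :: r)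
            rw [hbal, ihrd]
          · show List.reverse [] :: (g.1 ++ [g.2.1.reverse]).reverse
                = pvSplit ("," :: r) (total - pvBal ("," :: r))
            rw [hbal, hd0, pvSplit_comma, ← hd0, ← ihsp]
            simp
        · have hstep : pvStepRev total g t = (g.1, g.2.1 ++ [t], g.2.2) := by
            simp [pvStepRev, h1, h2, h3]
          rw [hstep]
          have hnot : ¬ (total - pvBal (t :: r) = 0 ∧ t = ",") := by
            intro ⟨hz, ht⟩
            rw [hbal] at hz
            exact h3 ⟨ht, by rw [ihrd]; omega⟩
          refine ⟨?_, ?_⟩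
          · show g.2.2 = -pvBal (t :: r)
            rw [hbal, ihrd]
          · show (g.2.1 ++ [t]).reverse :: g.1.reverse = pvSplit (t :: r) (total - pvBal (t :: r))
            rw [pvSplit_other r _ t h1 h2 hnot, hbal, ← ihsp, pvConsHead_cons]
            simp

lemma pvBal_count (l : List String) :
    pvBal l = (PySem.List.count l "(" : Int) - (PySem.List.count l ")" : Int) := by
  induction l with
  | nil => simp [pvBal, PySem.List.count_eq]
  | cons t r ih =>
    by_cases h1 : t = "("
    · subst h1
      simp only [pvBal, PySem.List.count_eq, List.count_cons] at *
      simp only [ih]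
      push_cast
      simp
      ring
    · by_cases h2 : t = ")"
      · subst h2
        simp only [pvBal, PySem.List.count_eq, List.count_cons] at *
        simp only [ih]
        push_cast
        simp
        ring
      · simp only [pvBal, PySem.List.count_eq, List.count_cons] at *
        simp only [ih]
        push_cast
        simp [h1, h2]

-- ===== VERDICT (by name: the statement is the Claim_ definition above) =====
theorem splitOrderByItems_spec : Claim_equal_splitOrderByItems := by
  intro tokens _
  unfold Spec_splitOrderByItems splitOrderByItems splitOrderByItems_alt
  simp only [List.foldl_reverse]
  -- A's side
  have hA := pvFoldA tokens tokens 0 0 0 [] (by simp) (le_refl 0)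
  simp only [Nat.cast_zero, List.drop_zero, List.take_zero, Nat.sub_zero] at hA
  rw [show (PySem.List.enumerate tokens : List (Int × String)) = PySem.List.enumerate tokens 0 from rfl]
  rw [hA, List.nil_append, pvPrep_nil _ (pvSplit_ne_nil tokens 0)]
  -- B's side
  have hB := pvFoldB ((PySem.List.count tokens "(" : Int) - (PySem.List.count tokens ")" : Int)) tokens
  obtain ⟨-, hB2⟩ := hB
  have h0 : ((PySem.List.count tokens "(" : Int) - (PySem.List.count tokens ")" : Int)) - pvBal tokens = 0 := by
    rw [pvBal_count]; ring
  rw [h0] at hB2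
  rw [List.reverse_append, List.reverse_singleton, List.singleton_append]
  exact hB2.symm
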